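-- pv_equiv track=rewrite | github.com/xmavericks/LearnSqlWithPython | SQL_Joins/sql_left_join_internal_work.py | return_left_join_results
-- ===== SOURCE A (Python) =====
-- def return_left_join_results(table_one, table_two):
--     """This method illustrates how LEFT JOIN Works internally in SQL
--
--     Definition: SQL LEFT JOIN, also known as a LEFT OUTER JOIN, is a
--     type of SQL JOIN operation that retrieves all records from the
--     left table (table1) and the matching records from the right table (table2).
--     If there are no matching records in the right table, NULL values are included for those columns.
--     """
--     # INNER JOIN
--     data_list_table_one = []
--     data_list_table_two = []
--     for item in table_one:
--         for ele in table_two: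
--             if item == ele and ele != 'null':
--                 data_list_table_one.append(ele)
--                 data_list_table_two.append(ele)
--
--     # ADDITIONAL ELEMENTS OF LEFT TABLE NOT PRESENT IN RIGHT TABLE
--     for item in table_one:
--         if item not in table_two or item == 'null':
--             data_list_table_one.append(item)
--             data_list_table_two.append('null')
--
--     items = {
--         "table_one_updated_result": data_list_table_one,
--         "table_two_updated_result": data_list_table_two
--     }
--
--     return items
-- ===== SOURCE B (Python) =====
-- def return_left_join_results(table_one, table_two):
--     """LEFT JOIN simulated with a count dictionary built once over table_two
--     and a single bucketed pass over table_one."""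
--     counts = {}
--     for ele in table_two:
--         counts[ele] = counts.get(ele, 0) + 1
--     inner = []
--     unmatched = []
--     for item in table_one:
--         c = counts.get(item, 0)
--         if item != 'null' and c > 0:
--             inner.extend([item] * c)
--         else:
--             unmatched.append(item)
--     return {
--         "table_one_updated_result": inner + unmatched,
--         "table_two_updated_result": inner + ['null'] * len(unmatched)
--     }
-- ===== Notes on version B (the rewrite author's own statement) =====
-- stated objective: alternative
-- what changed: Replaces A's nested scan over table_two per item (plus a second membership pass) with a count dictionary built once and a single bucketed pass over table_one, concatenating the matched and unmatched buckets at the end.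
import Mathlib
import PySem

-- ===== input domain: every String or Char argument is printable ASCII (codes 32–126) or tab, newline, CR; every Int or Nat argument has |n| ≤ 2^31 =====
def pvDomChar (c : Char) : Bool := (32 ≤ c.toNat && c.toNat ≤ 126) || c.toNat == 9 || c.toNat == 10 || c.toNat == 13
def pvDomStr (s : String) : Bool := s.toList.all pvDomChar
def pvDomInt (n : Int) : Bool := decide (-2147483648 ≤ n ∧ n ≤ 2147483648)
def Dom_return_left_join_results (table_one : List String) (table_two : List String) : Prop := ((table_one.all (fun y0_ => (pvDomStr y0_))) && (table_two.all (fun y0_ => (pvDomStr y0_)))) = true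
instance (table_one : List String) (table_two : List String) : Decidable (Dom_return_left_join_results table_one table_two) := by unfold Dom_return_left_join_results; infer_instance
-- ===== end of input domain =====

-- B replaces A's nested scan per item (plus a second membership pass) with a count
-- dictionary built once over table_two and a single bucketed pass over table_one (alternative decomposition).

-- ===== PORT A =====
def return_left_join_results (table_one : List String) (table_two : List String) : List (String × List String) :=
  -- INNER JOIN: two result lists, nested loops
  let s1 := table_one.foldl (fun acc item =>
      table_two.foldl (fun acc2 ele =>
        if item == ele && ele != "null" then (acc2.1 ++ [ele], acc2.2 ++ [ele]) else acc2) acc)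
    (([] : List String), ([] : List String))
  -- additional elements of the left table not present in the right table
  let s2 := table_one.foldl (fun acc item =>
      if !(table_two.contains item) || item == "null" then (acc.1 ++ [item], acc.2 ++ ["null"]) else acc) s1
  [("table_one_updated_result", s2.1), ("table_two_updated_result", s2.2)]

-- ===== PORT B =====
def return_left_join_results_alt (table_one : List String) (table_two : List String) : List (String × List String) :=
  let counts := table_two.foldl (fun d ele => d.insert ele (d.getD ele 0 + 1)) (PySem.Dict.empty : PySem.Dict String Int)
  let st := table_one.foldl (fun (acc : List String × List String) item =>
      let c := counts.getD item 0
      if item != "null" && decide (0 < c) then (acc.1 ++ List.replicate c.toNat item, acc.2)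
      else (acc.1, acc.2 ++ [item])) (([] : List String), ([] : List String))
  [("table_one_updated_result", st.1 ++ st.2), ("table_two_updated_result", st.1 ++ List.replicate st.2.length "null")]

-- ===== PRECONDITION & SPEC =====
def Spec_return_left_join_results (table_one : List String) (table_two : List String) (out : List (String × List String)) : Prop := out = return_left_join_results_alt table_one table_two
instance (table_one : List String) (table_two : List String) (out : List (String × List String)) : Decidable (Spec_return_left_join_results table_one table_two out) := by unfold Spec_return_left_join_results; infer_instance

-- ===== CLAIM (what is proved, stated in full; the proofs are below) =====
def Claim_equal_return_left_join_results : Prop := ∀ (table_one : List String) (table_two : List String), Dom_return_left_join_results table_one table_two → Spec_return_left_join_results table_one table_two (return_left_join_results table_one table_two)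

-- ===== LEMMAS AND PROOFS =====

-- the right-table copies an item of the left table picks up in the inner join
def pvRep (table_two : List String) (item : String) : List String :=
  if item = "null" then [] else List.replicate (table_two.count item) item

-- whether the item is matched (goes to the inner-join bucket)
def pvMatched (table_two : List String) (item : String) : Bool :=
  item != "null" && table_two.contains item

theorem pv_innerA (table_two : List String) (item : String) (a b : List String) :
    table_two.foldl (fun acc2 ele =>
        if item == ele && ele != "null" then (acc2.1 ++ [ele], acc2.2 ++ [ele]) else acc2) (a, b)
      = (a ++ pvRep table_two item, b ++ pvRep table_two item) := by
  induction table_two generalizing a b with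
  | nil => simp [pvRep]
  | cons ele t ih =>
    rw [List.foldl_cons]
    by_cases hc : (item == ele && ele != "null") = true
    · have he : item = ele := by simpa using (by exact_mod_cast (by simpa using hc : item = ele ∧ ele ≠ "null").1)
      have hn : ele ≠ "null" := (by simpa using hc : item = ele ∧ ele ≠ "null").2
      subst he
      rw [if_pos hc, ih]
      simp [pvRep, hn, List.replicate_succ]
    · rw [if_neg hc, ih]
      have hrep : pvRep (ele :: t) item = pvRep t item := by
        by_cases hn : item = "null"
        · simp [pvRep, hn]
        · have hne : ele ≠ item := by
            intro h; subst h; simp [hn] at hc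
          simp [pvRep, hn, hne]
      rw [hrep]

theorem pv_fold1A (table_one table_two : List String) (a b : List String) :
    table_one.foldl (fun acc item =>
        table_two.foldl (fun acc2 ele =>
          if item == ele && ele != "null" then (acc2.1 ++ [ele], acc2.2 ++ [ele]) else acc2) acc) (a, b)
      = (a ++ table_one.flatMap (pvRep table_two), b ++ table_one.flatMap (pvRep table_two)) := by
  induction table_one generalizing a b with
  | nil => simp
  | cons x t ih => simp only [List.foldl_cons, pv_innerA, ih, List.flatMap_cons, List.append_assoc]

theorem pv_fold2A (table_one table_two : List String) (a b : List String) :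
    table_one.foldl (fun acc item =>
        if !(table_two.contains item) || item == "null" then (acc.1 ++ [item], acc.2 ++ ["null"]) else acc) (a, b)
      = (a ++ table_one.filter (fun item => !(pvMatched table_two item)),
         b ++ List.replicate (table_one.filter (fun item => !(pvMatched table_two item))).length "null") := by
  induction table_one generalizing a b with
  | nil => simp
  | cons x t ih =>
    rw [List.foldl_cons]
    by_cases hm : pvMatched table_two x = true
    · have hx1 : x ≠ "null" := by intro h; simp [pvMatched, h] at hm
      have hx2 : x ∈ table_two := by by_contra h; simp [pvMatched, h] at hm
      rw [if_neg (by simp [hx1, hx2]), ih]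
      simp [hm]
    · have hm' : pvMatched table_two x = false := by simpa using hm
      have hcond : (!(table_two.contains x) || x == "null") = true := by
        by_cases hx : x = "null"
        · simp [hx]
        · cases hc : table_two.contains x with
          | false => simp
          | true =>
            exfalso
            simp [pvMatched, hx] at hm'
            exact hm' (by simpa using hc)
      rw [if_pos hcond, ih]
      have hflt : (!(pvMatched table_two x)) = true := by simp [hm']
      simp [hflt, List.replicate_succ, List.append_assoc]

theorem pv_counts (table_two : List String) (item : String) :
    (table_two.foldl (fun d ele => d.insert ele (d.getD ele 0 + 1)) (PySem.Dict.empty : PySem.Dict String Int)).getD item 0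
      = (table_two.count item : Int) := by
  rw [PySem.Dict.getD_foldl_insert_add_one]
  simp [PySem.Dict.getD_empty]

theorem pv_cond (table_two : List String) (item : String) :
    (item != "null" && decide ((0 : Int) < (table_two.count item : Int))) = pvMatched table_two item := by
  simp [pvMatched, List.count_pos_iff]

theorem pv_repB (table_two : List String) (item : String) (h : pvMatched table_two item = true) :
    List.replicate ((table_two.count item : Int)).toNat item = pvRep table_two item := by
  have hn : ¬ item = "null" := by
    simp [pvMatched] at h; exact h.1
  simp [pvRep, hn]

theorem pv_rep_nil (table_two : List String) (item : String) (h : pvMatched table_two item = false) :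
    pvRep table_two item = [] := by
  by_cases hn : item = "null"
  · simp [pvRep, hn]
  · have : ¬ item ∈ table_two := by simpa [pvMatched, hn] using h
    simp [pvRep, hn, List.count_eq_zero_of_not_mem this]

theorem pv_foldB_clean (table_one table_two : List String) (a b : List String) :
    table_one.foldl (fun (acc : List String × List String) item =>
        if pvMatched table_two item then (acc.1 ++ pvRep table_two item, acc.2)
        else (acc.1, acc.2 ++ [item])) (a, b)
      = (a ++ table_one.flatMap (pvRep table_two),
         b ++ table_one.filter (fun item => !(pvMatched table_two item))) := by
  induction table_one generalizing a b with
  | nil => simp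
  | cons x t ih =>
    rw [List.foldl_cons]
    by_cases hm : pvMatched table_two x = true
    · rw [if_pos hm, ih]
      simp [hm, List.append_assoc]
    · have hm' : pvMatched table_two x = false := by simpa using hm
      rw [if_neg hm, ih]
      simp [hm', pv_rep_nil table_two x hm', List.append_assoc]

theorem pv_foldB (table_one table_two : List String) (a b : List String) :
    table_one.foldl (fun (acc : List String × List String) item =>
        let c := (table_two.foldl (fun d ele => d.insert ele (d.getD ele 0 + 1)) (PySem.Dict.empty : PySem.Dict String Int)).getD item 0
        if item != "null" && decide (0 < c) then (acc.1 ++ List.replicate c.toNat item, acc.2)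
        else (acc.1, acc.2 ++ [item])) (a, b)
      = (a ++ table_one.flatMap (pvRep table_two),
         b ++ table_one.filter (fun item => !(pvMatched table_two item))) := by
  have hstep : (fun (acc : List String × List String) (item : String) =>
        let c := (table_two.foldl (fun d ele => d.insert ele (d.getD ele 0 + 1)) (PySem.Dict.empty : PySem.Dict String Int)).getD item 0
        if item != "null" && decide (0 < c) then (acc.1 ++ List.replicate c.toNat item, acc.2)
        else (acc.1, acc.2 ++ [item]))
      = (fun (acc : List String × List String) item =>
        if pvMatched table_two item then (acc.1 ++ pvRep table_two item, acc.2)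
        else (acc.1, acc.2 ++ [item])) := by
    funext acc item
    show (if (item != "null" && decide (0 < (table_two.foldl (fun d ele => d.insert ele (d.getD ele 0 + 1)) (PySem.Dict.empty : PySem.Dict String Int)).getD item 0)) = true
          then (acc.1 ++ List.replicate ((table_two.foldl (fun d ele => d.insert ele (d.getD ele 0 + 1)) (PySem.Dict.empty : PySem.Dict String Int)).getD item 0).toNat item, acc.2)
          else (acc.1, acc.2 ++ [item])) = _
    rw [pv_counts, pv_cond]
    by_cases hm : pvMatched table_two item = true
    · rw [if_pos hm, if_pos hm, pv_repB table_two item hm]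
    · rw [if_neg hm, if_neg hm]
  rw [hstep, pv_foldB_clean]

-- ===== VERDICT (by name: the statement is the Claim_ definition above) =====
theorem return_left_join_results_spec : Claim_equal_return_left_join_results := by
  intro table_one table_two _
  unfold Spec_return_left_join_results return_left_join_results return_left_join_results_alt
  simp only [pv_fold1A, pv_fold2A, pv_foldB]
  simp
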